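-- pv_equiv track=rewrite | github.com/brlambert7818/anlp | assignment02/asgn2.py | get_co_range
-- ===== SOURCE A (Python) =====
-- def get_co_range(lower, upper, counts_filter, co_counts_filter):
--
--     temp_counts = {}
--     for k,v in counts_filter.items():
--         if lower <= counts_filter[k] <= upper:
--             temp_counts[k] = v
--
--     co_occurs = {}
--     for k1, v1 in temp_counts.items():
--         w1s = []
--         for k2, v2 in temp_counts.items():
--             if k1 != k2:
--                 if k2 in co_counts_filter[k1].keys():
--                     w1s.append(k2)
--         if len(w1s) > 0:
--             co_occurs[k1] = w1s
--     return co_occurs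
-- ===== SOURCE B (Python) =====
-- def get_co_range(lower, upper, counts_filter, co_counts_filter):
--     order = {}
--     for k, v in counts_filter.items():
--         if lower <= v <= upper:
--             order[k] = len(order)
--     result = {}
--     for k1 in order:
--         nbrs = [k2 for k2 in co_counts_filter.get(k1, {}) if k2 != k1 and k2 in order]
--         nbrs.sort(key=order.__getitem__)
--         if nbrs:
--             result[k1] = nbrs
--     return result
-- ===== Notes on version B (the rewrite author's own statement) =====
-- stated objective: alternative
-- what changed: A runs an all-pairs scan over the filtered words with a dict-keys membership test per pair; B builds a word-to-position index once, iterates only each word's own sparse co-occurrence dict, and restores A's ordering by sorting the hits by that index.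
import Mathlib
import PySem

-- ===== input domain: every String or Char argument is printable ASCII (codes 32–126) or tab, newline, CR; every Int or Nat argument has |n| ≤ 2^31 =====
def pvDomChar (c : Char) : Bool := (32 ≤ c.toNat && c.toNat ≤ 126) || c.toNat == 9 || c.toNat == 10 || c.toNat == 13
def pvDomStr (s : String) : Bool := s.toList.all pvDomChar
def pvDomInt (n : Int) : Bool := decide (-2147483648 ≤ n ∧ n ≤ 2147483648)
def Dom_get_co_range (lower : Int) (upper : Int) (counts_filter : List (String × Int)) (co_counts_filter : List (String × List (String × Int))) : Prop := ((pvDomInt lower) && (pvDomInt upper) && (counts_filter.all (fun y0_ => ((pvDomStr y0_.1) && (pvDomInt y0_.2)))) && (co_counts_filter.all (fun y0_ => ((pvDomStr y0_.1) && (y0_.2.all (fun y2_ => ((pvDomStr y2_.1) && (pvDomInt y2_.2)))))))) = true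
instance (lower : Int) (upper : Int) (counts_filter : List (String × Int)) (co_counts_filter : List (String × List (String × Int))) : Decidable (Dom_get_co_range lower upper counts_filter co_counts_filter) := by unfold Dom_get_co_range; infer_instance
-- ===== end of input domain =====

-- B replaces A's all-pairs scan over the filtered words by one pass over each word's own sparse
-- co-occurrence dict, re-ordered via a precomputed word→position index (objective: alternative).

-- ===== PORT A =====
-- temp_counts loop (dict of in-range words; 'counts_filter[k]' is the dict lookup)
def pvA_temp (lower : Int) (upper : Int) (cf : List (String × Int)) : PySem.Dict String Int :=
  cf.foldl (fun t kv =>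
    match (PySem.Dict.mk cf).get? kv.1 with
    | some c => if lower ≤ c ∧ c ≤ upper then t.insert kv.1 kv.2 else t
    | none => t) PySem.Dict.empty

-- inner loop building w1s for one k1; 'co_counts_filter[k1]' raises KeyError when k1 is
-- missing — those inputs are excluded by Pre_, the none branch is unreachable there
def pvA_w1s (ccf : List (String × List (String × Int))) (temp_items : List (String × Int)) (k1 : String) : List String :=
  temp_items.foldl (fun w kv2 =>
    if k1 ≠ kv2.1 then
      match (PySem.Dict.mk ccf).get? k1 with
      | some inner => if (PySem.Dict.mk inner).contains kv2.1 then w ++ [kv2.1] else w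
      | none => w
    else w) []

def get_co_range (lower : Int) (upper : Int) (counts_filter : List (String × Int)) (co_counts_filter : List (String × List (String × Int))) : List (String × List String) :=
  let temp_counts := pvA_temp lower upper counts_filter
  (temp_counts.items.foldl (fun co kv1 =>
      let w1s := pvA_w1s co_counts_filter temp_counts.items kv1.1
      if w1s.length > 0 then co.insert kv1.1 w1s else co) PySem.Dict.empty).items

-- ===== PORT B =====
-- order: in-range word → its position (order[k] = len(order))
def pvB_order (lower : Int) (upper : Int) (cf : List (String × Int)) : PySem.Dict String Int :=
  cf.foldl (fun d kv =>
    if lower ≤ kv.2 ∧ kv.2 ≤ upper then d.insert kv.1 (d.size : Int) else d) PySem.Dict.empty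

-- [k2 for k2 in co_counts_filter.get(k1, {}) if k2 != k1 and k2 in order]; then sort by order[k2]
def pvB_nbrs (ccf : List (String × List (String × Int))) (order : PySem.Dict String Int) (k1 : String) : List String :=
  let nbrs := (PySem.Dict.mk ((PySem.Dict.mk ccf).getD k1 [])).keys.filter
                (fun k2 => k2 != k1 && order.contains k2)
  PySem.List.sorted nbrs (fun k2 => order.getD k2 0) false

def get_co_range_alt (lower : Int) (upper : Int) (counts_filter : List (String × Int)) (co_counts_filter : List (String × List (String × Int))) : List (String × List String) :=
  let order := pvB_order lower upper counts_filter
  (order.keys.foldl (fun res k1 =>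
      let nbrs := pvB_nbrs co_counts_filter order k1
      if nbrs ≠ [] then res.insert k1 nbrs else res) PySem.Dict.empty).items

-- ===== PRECONDITION & SPEC =====
-- Pre_ excludes (a) association lists with duplicate keys, which have no Python-dict counterpart
-- (the Python function receives dicts, where duplicates cannot occur), and (b) the inputs on which
-- A raises KeyError: two or more in-range words while some in-range word is missing from
-- co_counts_filter.
def Pre_get_co_range (lower : Int) (upper : Int) (counts_filter : List (String × Int)) (co_counts_filter : List (String × List (String × Int))) : Prop :=
  (counts_filter.map Prod.fst).Nodup ∧
  (co_counts_filter.map Prod.fst).Nodup ∧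
  (∀ p ∈ co_counts_filter, (p.2.map Prod.fst).Nodup) ∧
  ((counts_filter.filter (fun kv => decide (lower ≤ kv.2 ∧ kv.2 ≤ upper))).length ≤ 1 ∨
    ∀ kv ∈ counts_filter, lower ≤ kv.2 → kv.2 ≤ upper → kv.1 ∈ co_counts_filter.map Prod.fst)
instance (lower : Int) (upper : Int) (counts_filter : List (String × Int)) (co_counts_filter : List (String × List (String × Int))) : Decidable (Pre_get_co_range lower upper counts_filter co_counts_filter) := by unfold Pre_get_co_range; infer_instance

def pvWitness_get_co_range : Int × Int × (List (String × Int)) × (List (String × List (String × Int))) :=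
  (0, 5, [("a", 2), ("b", 3), ("c", 9)], [("a", [("b", 1)]), ("b", [("a", 4)])])

def Spec_get_co_range (lower : Int) (upper : Int) (counts_filter : List (String × Int)) (co_counts_filter : List (String × List (String × Int))) (out : List (String × List String)) : Prop := out = get_co_range_alt lower upper counts_filter co_counts_filter
instance (lower : Int) (upper : Int) (counts_filter : List (String × Int)) (co_counts_filter : List (String × List (String × Int))) (out : List (String × List String)) : Decidable (Spec_get_co_range lower upper counts_filter co_counts_filter out) := by unfold Spec_get_co_range; infer_instance

-- ===== CLAIM (what is proved, stated in full; the proofs are below) =====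
def Claim_equal_get_co_range : Prop := ∀ (lower : Int) (upper : Int) (counts_filter : List (String × Int)) (co_counts_filter : List (String × List (String × Int))), Dom_get_co_range lower upper counts_filter co_counts_filter → Pre_get_co_range lower upper counts_filter co_counts_filter → Spec_get_co_range lower upper counts_filter co_counts_filter (get_co_range lower upper counts_filter co_counts_filter)

-- ===== LEMMAS AND PROOFS =====

-- enumerate ks with consecutive Int indices starting at n (the items of B's 'order' dict)
def pvEnum : List String → Nat → List (String × Int)
  | [], _ => []
  | k :: t, n => (k, (n : Int)) :: pvEnum t (n + 1)

theorem pvEnum_map_fst (ks : List String) : ∀ n, (pvEnum ks n).map Prod.fst = ks := by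
  induction ks with
  | nil => intro n; rfl
  | cons k t ih => intro n; simp [pvEnum, ih]

theorem pvEnum_mem_getElem (ks : List String) : ∀ (n i : Nat) (h : i < ks.length),
    (ks[i], ((n + i : Nat) : Int)) ∈ pvEnum ks n := by
  induction ks with
  | nil => intro n i h; simp at h
  | cons k t ih =>
    intro n i h
    cases i with
    | zero => simp [pvEnum]
    | succ j =>
      have := ih (n + 1) j (by simpa using Nat.lt_of_succ_lt_succ h)
      simp only [pvEnum, List.mem_cons]
      right
      have harith : n + 1 + j = n + (j + 1) := by omega
      simpa [harith] using this

def pvTl (lower upper : Int) (cf : List (String × Int)) : List (String × Int) :=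
  cf.filter (fun kv => decide (lower ≤ kv.2 ∧ kv.2 ≤ upper))

def pvTks (lower upper : Int) (cf : List (String × Int)) : List String :=
  (pvTl lower upper cf).map Prod.fst

theorem pvTks_nodup (lower upper : Int) (cf : List (String × Int))
    (hcf : (cf.map Prod.fst).Nodup) : (pvTks lower upper cf).Nodup :=
  List.Nodup.sublist (List.Sublist.map Prod.fst List.filter_sublist) hcf

theorem pv_foldl_insert_filter (lower upper : Int) :
    ∀ (l : List (String × Int)) (d : PySem.Dict String Int),
    (l.map Prod.fst).Nodup → (∀ kv ∈ l, d.contains kv.1 = false) →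
    (l.foldl (fun t kv => if lower ≤ kv.2 ∧ kv.2 ≤ upper then t.insert kv.1 kv.2 else t) d).items
      = d.items ++ l.filter (fun kv => decide (lower ≤ kv.2 ∧ kv.2 ≤ upper)) := by
  intro l
  induction l with
  | nil => intro d _ _; simp
  | cons kv t ih =>
    intro d hnd hfresh
    simp only [List.map_cons, List.nodup_cons] at hnd
    by_cases hp : lower ≤ kv.2 ∧ kv.2 ≤ upper
    · have hdkv : d.contains kv.1 = false := hfresh kv (by simp)
      have hrest : ∀ kv' ∈ t, (d.insert kv.1 kv.2).contains kv'.1 = false := by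
        intro kv' hkv'
        rw [PySem.Dict.contains_insert]
        have h1 : kv'.1 ≠ kv.1 := by
          intro hEq; exact hnd.1 (hEq ▸ List.mem_map_of_mem hkv')
        simp [h1, hfresh kv' (List.mem_cons_of_mem _ hkv')]
      have hfilter : (kv :: t).filter (fun kv => decide (lower ≤ kv.2 ∧ kv.2 ≤ upper))
          = kv :: t.filter (fun kv => decide (lower ≤ kv.2 ∧ kv.2 ≤ upper)) := by
        simp [hp]
      rw [hfilter, List.foldl_cons, if_pos hp, ih _ hnd.2 hrest,
        PySem.Dict.items_insert_of_not_contains _ _ hdkv]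
      simp
    · have hfilter : (kv :: t).filter (fun kv => decide (lower ≤ kv.2 ∧ kv.2 ≤ upper))
          = t.filter (fun kv => decide (lower ≤ kv.2 ∧ kv.2 ≤ upper)) := by
        simp [hp]
      rw [hfilter, List.foldl_cons, if_neg hp]
      exact ih _ hnd.2 (fun kv' h => hfresh kv' (List.mem_cons_of_mem _ h))

theorem pvA_temp_items (lower upper : Int) (cf : List (String × Int))
    (hcf : (cf.map Prod.fst).Nodup) :
    (pvA_temp lower upper cf).items = pvTl lower upper cf := by
  unfold pvA_temp pvTl
  rw [PySem.List.foldl_congr_mem' cf _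
      (fun t kv => if lower ≤ kv.2 ∧ kv.2 ≤ upper then t.insert kv.1 kv.2 else t) _ ?_]
  · simpa using pv_foldl_insert_filter lower upper cf PySem.Dict.empty hcf
      (fun kv _ => PySem.Dict.contains_empty _)
  · intro kv hkv acc
    have hm : (kv.1, kv.2) ∈ (PySem.Dict.mk cf).items := by simpa using hkv
    have : (PySem.Dict.mk cf).get? kv.1 = some kv.2 :=
      PySem.Dict.get?_of_mem_items _ hm (by simpa [PySem.Dict.keys_mk] using hcf)
    rw [this]

theorem pv_foldl_order (lower upper : Int) :
    ∀ (l : List (String × Int)) (d : PySem.Dict String Int),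
    (((l.filter (fun kv => decide (lower ≤ kv.2 ∧ kv.2 ≤ upper))).map Prod.fst).Nodup) →
    (∀ kv ∈ l.filter (fun kv => decide (lower ≤ kv.2 ∧ kv.2 ≤ upper)), d.contains kv.1 = false) →
    (l.foldl (fun d kv => if lower ≤ kv.2 ∧ kv.2 ≤ upper then d.insert kv.1 (d.size : Int) else d) d).items
      = d.items ++ pvEnum ((l.filter (fun kv => decide (lower ≤ kv.2 ∧ kv.2 ≤ upper))).map Prod.fst) d.size := by
  intro l
  induction l with
  | nil => intro d _ _; simp [pvEnum]
  | cons kv t ih =>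
    intro d hnd hfresh
    by_cases hp : lower ≤ kv.2 ∧ kv.2 ≤ upper
    · have hmem : kv ∈ (kv :: t).filter (fun kv => decide (lower ≤ kv.2 ∧ kv.2 ≤ upper)) := by
        simp [List.filter_cons, hp]
      have hdkv : d.contains kv.1 = false := hfresh kv hmem
      have hfilter : (kv :: t).filter (fun kv => decide (lower ≤ kv.2 ∧ kv.2 ≤ upper))
          = kv :: t.filter (fun kv => decide (lower ≤ kv.2 ∧ kv.2 ≤ upper)) := by
        simp [List.filter_cons, hp]
      rw [hfilter] at hnd hfresh
      simp only [List.map_cons, List.nodup_cons] at hnd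
      have hrest : ∀ kv' ∈ t.filter (fun kv => decide (lower ≤ kv.2 ∧ kv.2 ≤ upper)),
          (d.insert kv.1 (d.size : Int)).contains kv'.1 = false := by
        intro kv' hkv'
        rw [PySem.Dict.contains_insert]
        have h1 : kv'.1 ≠ kv.1 := by
          intro hEq; exact hnd.1 (hEq ▸ List.mem_map_of_mem hkv')
        simp [h1, hfresh kv' (List.mem_cons_of_mem _ hkv')]
      simp only [List.foldl_cons, if_pos hp, hfilter]
      rw [ih _ hnd.2 hrest, PySem.Dict.items_insert_of_not_contains _ _ hdkv]
      have hsz : (d.insert kv.1 (d.size : Int)).size = d.size + 1 := by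
        rw [PySem.Dict.size_insert]; simp [hdkv]
      simp [hsz, pvEnum]
    · have hfilter : (kv :: t).filter (fun kv => decide (lower ≤ kv.2 ∧ kv.2 ≤ upper))
          = t.filter (fun kv => decide (lower ≤ kv.2 ∧ kv.2 ≤ upper)) := by
        simp [List.filter_cons, hp]
      rw [hfilter] at hnd hfresh
      simp only [List.foldl_cons, if_neg hp, hfilter]
      exact ih _ hnd hfresh

theorem pvB_order_items (lower upper : Int) (cf : List (String × Int))
    (hcf : (cf.map Prod.fst).Nodup) :
    (pvB_order lower upper cf).items = pvEnum (pvTks lower upper cf) 0 := by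
  unfold pvB_order
  have := pv_foldl_order lower upper cf PySem.Dict.empty
    (pvTks_nodup lower upper cf hcf) (fun kv _ => PySem.Dict.contains_empty _)
  simpa [pvTks, pvTl, PySem.Dict.size] using this

theorem pvB_order_keys (lower upper : Int) (cf : List (String × Int))
    (hcf : (cf.map Prod.fst).Nodup) :
    (pvB_order lower upper cf).keys = pvTks lower upper cf := by
  simp only [PySem.Dict.keys, pvB_order_items lower upper cf hcf, pvEnum_map_fst]

theorem pvB_order_contains (lower upper : Int) (cf : List (String × Int))
    (hcf : (cf.map Prod.fst).Nodup) (k : String) :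
    (pvB_order lower upper cf).contains k = decide (k ∈ pvTks lower upper cf) := by
  rw [PySem.Dict.contains_eq_decide_mem_keys, pvB_order_keys lower upper cf hcf]

theorem pvB_order_getD (lower upper : Int) (cf : List (String × Int))
    (hcf : (cf.map Prod.fst).Nodup) (i : Nat) (h : i < (pvTks lower upper cf).length) :
    (pvB_order lower upper cf).getD (pvTks lower upper cf)[i] 0 = (i : Int) := by
  have hmem : ((pvTks lower upper cf)[i], ((0 + i : Nat) : Int)) ∈ pvEnum (pvTks lower upper cf) 0 :=
    pvEnum_mem_getElem _ 0 i h
  have hmem' : ((pvTks lower upper cf)[i], ((i : Nat) : Int)) ∈ (pvB_order lower upper cf).items := by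
    rw [pvB_order_items lower upper cf hcf]; simpa using hmem
  have hnd : (pvB_order lower upper cf).keys.Nodup := by
    rw [pvB_order_keys lower upper cf hcf]; exact pvTks_nodup lower upper cf hcf
  exact PySem.Dict.getD_of_mem_items _ hmem' hnd 0

theorem pvB_order_pairwise (lower upper : Int) (cf : List (String × Int))
    (hcf : (cf.map Prod.fst).Nodup) :
    (pvTks lower upper cf).Pairwise
      (fun a b => (pvB_order lower upper cf).getD a 0 < (pvB_order lower upper cf).getD b 0) := by
  rw [List.pairwise_iff_getElem]
  intro i j hi hj hij
  rw [pvB_order_getD lower upper cf hcf i hi, pvB_order_getD lower upper cf hcf j hj]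
  exact_mod_cast hij

theorem pv_w1s_eq (lower upper : Int) (cf : List (String × Int))
    (ccf : List (String × List (String × Int)))
    (hcf : (cf.map Prod.fst).Nodup)
    (hinner : ∀ p ∈ ccf, (p.2.map Prod.fst).Nodup)
    (k1 : String) (inner : List (String × Int))
    (hcc : (PySem.Dict.mk ccf).get? k1 = some inner) :
    pvA_w1s ccf (pvTl lower upper cf) k1 = pvB_nbrs ccf (pvB_order lower upper cf) k1 := by
  -- A side: turn the fold into a filter+map over the temp list
  have hA : pvA_w1s ccf (pvTl lower upper cf) k1
      = ((pvTl lower upper cf).filter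
          (fun kv2 => (k1 != kv2.1) && (PySem.Dict.mk inner).contains kv2.1)).map Prod.fst := by
    unfold pvA_w1s
    rw [PySem.List.foldl_congr_mem' _ _
      (fun w kv2 => if ((k1 != kv2.1) && (PySem.Dict.mk inner).contains kv2.1) = true
        then w ++ [kv2.1] else w) _ ?_]
    · exact PySem.List.foldl_append_if _ _ _ []
    · intro kv2 _ acc
      rw [hcc]
      by_cases h1 : k1 = kv2.1
      · simp [h1]
      · by_cases h2 : (PySem.Dict.mk inner).contains kv2.1 <;> simp [h1, h2]
  -- B side
  have hgd : (PySem.Dict.mk ccf).getD k1 [] = inner := by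
    rw [PySem.Dict.getD_eq_get?_getD, hcc]; rfl
  have hinnnd : (inner.map Prod.fst).Nodup := by
    have hm : (k1, inner) ∈ ccf := by
      simpa using PySem.Dict.mem_items_of_get?_eq_some _ hcc
    exact hinner _ hm
  unfold pvB_nbrs
  rw [hgd, PySem.Dict.keys_mk, hA]
  -- sorted(filtered inner keys, key = position) equals A's temp-order filter
  refine Eq.symm (PySem.List.sorted_eq_of_perm_of_pairwise_lt _ _ _ ?_ ?_)
  · -- permutation: same distinct elements
    have hndA : (((pvTl lower upper cf).filter
        (fun kv2 => (k1 != kv2.1) && (PySem.Dict.mk inner).contains kv2.1)).map Prod.fst).Nodup := by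
      refine List.Nodup.sublist (List.Sublist.map Prod.fst List.filter_sublist)
        (pvTks_nodup lower upper cf hcf)
    have hndB : ((inner.map Prod.fst).filter
        (fun k2 => (k2 != k1) && (pvB_order lower upper cf).contains k2)).Nodup :=
      List.Nodup.filter _ hinnnd
    rw [List.perm_ext_iff_of_nodup hndA hndB]
    intro a
    constructor
    · intro ha
      simp only [List.mem_map, List.mem_filter, Bool.and_eq_true, bne_iff_ne] at ha
      obtain ⟨kv2, ⟨hkv2tl, hne, hcont⟩, hfst⟩ := ha
      subst hfst
      have hmemtks : kv2.1 ∈ pvTks lower upper cf := List.mem_map_of_mem hkv2tl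
      have hmeminner : kv2.1 ∈ inner.map Prod.fst := by
        have := (PySem.Dict.contains_iff_mem_keys _ kv2.1).mp hcont
        simpa [PySem.Dict.keys_mk] using this
      simp only [List.mem_filter, Bool.and_eq_true, bne_iff_ne]
      refine ⟨hmeminner, fun h => hne h.symm, ?_⟩
      rw [pvB_order_contains lower upper cf hcf]
      simpa using hmemtks
    · intro ha
      simp only [List.mem_filter, Bool.and_eq_true, bne_iff_ne] at ha
      obtain ⟨hmeminner, hne, hcont⟩ := ha
      rw [pvB_order_contains lower upper cf hcf] at hcont
      have hmemtks : a ∈ pvTks lower upper cf := by simpa using hcont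
      obtain ⟨kv2, hkv2tl, hfst⟩ := List.mem_map.mp hmemtks
      subst hfst
      simp only [List.mem_map, List.mem_filter, Bool.and_eq_true, bne_iff_ne]
      refine ⟨kv2, ⟨hkv2tl, fun h => hne h.symm, ?_⟩, rfl⟩
      rw [PySem.Dict.contains_iff_mem_keys, PySem.Dict.keys_mk]
      exact hmeminner
  · -- strictly increasing positions: a sublist of the temp order
    have hsub : List.Sublist (((pvTl lower upper cf).filter
        (fun kv2 => (k1 != kv2.1) && (PySem.Dict.mk inner).contains kv2.1)).map Prod.fst)
        (pvTks lower upper cf) :=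
      List.Sublist.map Prod.fst List.filter_sublist
    exact List.Pairwise.sublist hsub (pvB_order_pairwise lower upper cf hcf)

theorem get_co_range_spec : Claim_equal_get_co_range := by
  intro lower upper cf ccf hdom hpre
  obtain ⟨hcf, hccf, hinner, hlast⟩ := hpre
  unfold Spec_get_co_range
  show get_co_range lower upper cf ccf = get_co_range_alt lower upper cf ccf
  simp only [get_co_range, get_co_range_alt]
  rw [pvA_temp_items lower upper cf hcf, pvB_order_keys lower upper cf hcf]
  rcases hlast with hsmall | hsub
  · -- at most one in-range word: both sides are empty
    rcases htl : pvTl lower upper cf with _ | ⟨kv, rest⟩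
    · simp [pvTks, htl]
    · rcases rest with _ | ⟨kv2, rest2⟩
      · -- exactly one in-range word kv
        have hw1s : pvA_w1s ccf [kv] kv.1 = [] := by
          simp [pvA_w1s]
        have hnbrs : pvB_nbrs ccf (pvB_order lower upper cf) kv.1 = [] := by
          unfold pvB_nbrs
          rw [PySem.List.sorted_eq_nil_iff, List.filter_eq_nil_iff]
          intro k2 _
          by_cases h1 : k2 = kv.1
          · simp [h1]
          · rw [pvB_order_contains lower upper cf hcf]
            simp [pvTks, htl, h1]
        simp [pvTks, htl, hw1s, hnbrs]
      · exfalso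
        rw [pvTl] at htl
        rw [htl] at hsmall
        simp at hsmall
  · -- every in-range word has a co-occurrence dict
    rw [pvTks, List.foldl_map]
    rw [PySem.List.foldl_congr_mem' (pvTl lower upper cf) _
      (fun res kv1 =>
        let nbrs := pvB_nbrs ccf (pvB_order lower upper cf) kv1.1
        if nbrs ≠ [] then res.insert kv1.1 nbrs else res) _ ?_]
    intro kv1 hkv1 co
    have hkv1cf : kv1 ∈ cf ∧ lower ≤ kv1.2 ∧ kv1.2 ≤ upper := by
      have := List.mem_filter.mp hkv1
      simpa using this
    have hkeys : kv1.1 ∈ ccf.map Prod.fst := hsub kv1 hkv1cf.1 hkv1cf.2.1 hkv1cf.2.2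
    have hsome : ∃ inner, (PySem.Dict.mk ccf).get? kv1.1 = some inner := by
      rcases h : (PySem.Dict.mk ccf).get? kv1.1 with _ | inner
      · exfalso
        have := (PySem.Dict.get?_eq_none_iff_not_mem_keys _ kv1.1).mp h
        rw [PySem.Dict.keys_mk] at this
        exact this hkeys
      · exact ⟨inner, rfl⟩
    obtain ⟨inner, hcc⟩ := hsome
    have heq : pvA_w1s ccf (pvTl lower upper cf) kv1.1
        = pvB_nbrs ccf (pvB_order lower upper cf) kv1.1 :=
      pv_w1s_eq lower upper cf ccf hcf hinner kv1.1 inner hcc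
    simp only [heq]
    by_cases hnil : pvB_nbrs ccf (pvB_order lower upper cf) kv1.1 = []
    · simp [hnil]
    · have : (pvB_nbrs ccf (pvB_order lower upper cf) kv1.1).length > 0 :=
        List.length_pos_of_ne_nil hnil
      simp [hnil, this]
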